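-- pv_equiv track=rewrite | github.com/jupiterbjy/Sorting_in_visual | VisualMethod/__init__.py | _num_conv_gen
-- ===== SOURCE A (Python) =====
-- def _num_conv_gen(val: int, length):
--     for _ in range(length // 10 + (1 if length % 10 != 0 else 0)):
--         if val > 10:
--             yield ' '
--             val -= 10
--
--         elif val == 10:
--             yield '0'
--             val = 0
--
--         else:
--             yield str(val) if val else ' '
--             val = 0
-- ===== SOURCE B (Python) =====
-- def _num_conv_gen(val: int, length):
--     # Closed-form: the output is all spaces except one computed char at one position.
--     count = length // 10 + (1 if length % 10 != 0 else 0)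
--     d = 0 if val <= 10 else (val - 1) // 10
--     r = val - 10 * d
--     ch = '0' if r == 10 else (str(r) if r else ' ')
--     return (ch if i == d else ' ' for i in range(count))
-- ===== Notes on version B (the rewrite author's own statement) =====
-- stated objective: alternative
-- what changed: A simulates the loop statefully, decrementing val by 10 each step to decide what to yield; B computes the single non-space position d = (val-1)//10 (0 if val<=10) and its character in closed form and then emits by index comparison, with no mutable val.
import Mathlib
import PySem

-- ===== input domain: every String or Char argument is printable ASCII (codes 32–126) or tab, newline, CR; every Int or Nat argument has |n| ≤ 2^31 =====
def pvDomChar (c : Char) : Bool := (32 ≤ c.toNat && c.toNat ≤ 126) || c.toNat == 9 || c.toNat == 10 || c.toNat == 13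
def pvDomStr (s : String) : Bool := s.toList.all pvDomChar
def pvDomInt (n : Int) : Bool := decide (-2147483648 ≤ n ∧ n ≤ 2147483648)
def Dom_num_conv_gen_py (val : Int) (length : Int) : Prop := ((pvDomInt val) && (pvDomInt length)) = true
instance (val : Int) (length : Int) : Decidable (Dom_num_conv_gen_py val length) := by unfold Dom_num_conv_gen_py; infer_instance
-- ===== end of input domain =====

-- B replaces A's stateful decrement loop by a closed-form computation of the single
-- non-space position and character, then emits by index (objective: alternative decomposition).

-- ===== PORT A =====
-- the body of A's 'for _ in range(...)' loop, recursing on the remaining iteration count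
def numConvLoopA : Nat → Int → List String
  | 0, _ => []
  | n + 1, val =>
    if val > 10 then " " :: numConvLoopA n (val - 10)
    else if val = 10 then "0" :: numConvLoopA n 0
    else (if val ≠ 0 then PySem.Int.toStr val else " ") :: numConvLoopA n 0

def num_conv_gen_py (val : Int) (length : Int) : List String :=
  numConvLoopA (PySem.Int.floordiv length 10 + (if PySem.Int.mod length 10 ≠ 0 then 1 else 0)).toNat val

-- ===== PORT B =====
def num_conv_gen_py_alt (val : Int) (length : Int) : List String :=
  let count : Int := PySem.Int.floordiv length 10 + (if PySem.Int.mod length 10 ≠ 0 then 1 else 0)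
  let d : Int := if val ≤ 10 then 0 else PySem.Int.floordiv (val - 1) 10
  let r : Int := val - 10 * d
  let ch : String := if r = 10 then "0" else if r ≠ 0 then PySem.Int.toStr r else " "
  (List.range count.toNat).map (fun (i : Nat) => if (i : Int) = d then ch else " ")

-- ===== PRECONDITION & SPEC =====
def Spec_num_conv_gen_py (val : Int) (length : Int) (out : List String) : Prop := out = num_conv_gen_py_alt val length
instance (val : Int) (length : Int) (out : List String) : Decidable (Spec_num_conv_gen_py val length out) := by unfold Spec_num_conv_gen_py; infer_instance

-- ===== CLAIM (what is proved, stated in full; the proofs are below) =====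
def Claim_equal_num_conv_gen_py : Prop := ∀ (val : Int) (length : Int), Dom_num_conv_gen_py val length → Spec_num_conv_gen_py val length (num_conv_gen_py val length)

-- ===== LEMMAS AND PROOFS =====

def pvD (val : Int) : Int := if val ≤ 10 then 0 else PySem.Int.floordiv (val - 1) 10

def pvCh (val : Int) : String :=
  let r := val - 10 * pvD val
  if r = 10 then "0" else if r ≠ 0 then PySem.Int.toStr r else " "

theorem pvD_step (val : Int) (h : val > 10) : pvD (val - 10) = pvD val - 1 := by
  unfold pvD
  simp only [PySem.Int.floordiv_eq_ediv_of_pos (show (0:Int) < 10 by norm_num)]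
  split_ifs <;> omega

theorem pvD_pos (val : Int) (h : val > 10) : 0 < pvD val := by
  unfold pvD
  rw [if_neg (by omega), PySem.Int.floordiv_eq_ediv_of_pos (by omega)]
  omega

theorem pvCh_step (val : Int) (h : val > 10) : pvCh (val - 10) = pvCh val := by
  unfold pvCh
  rw [pvD_step val h]
  ring_nf

theorem loopA_eq (n : Nat) (val : Int) :
    numConvLoopA n val = (List.range n).map (fun (i : Nat) => if (i : Int) = pvD val then pvCh val else " ") := by
  induction n generalizing val with
  | zero => rfl
  | succ n ih =>
    rw [List.range_succ_eq_map, List.map_cons, List.map_map]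
    by_cases hv : val > 10
    · have hd := pvD_step val hv
      have hp := pvD_pos val hv
      rw [numConvLoopA, if_pos hv, ih (val - 10), hd, pvCh_step val hv]
      refine List.cons_eq_cons.mpr ⟨?_, ?_⟩
      · rw [if_neg (show ¬(((0 : Nat) : Int) = pvD val) by push_cast; omega)]
      · apply List.map_congr_left
        intro i _
        simp only [Function.comp]
        by_cases hi : (i : Int) = pvD val - 1
        · rw [if_pos hi, if_pos (by push_cast; omega)]
        · rw [if_neg hi, if_neg (by push_cast; omega)]
    · have hd : pvD val = 0 := by unfold pvD; rw [if_pos (by omega)]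
      have hch : pvCh val = if val = 10 then "0" else if val ≠ 0 then PySem.Int.toStr val else " " := by
        unfold pvCh; rw [hd]; ring_nf
      have hd0 : pvD 0 = 0 := by unfold pvD; rw [if_pos (by omega)]
      have hz : numConvLoopA n 0 = List.map ((fun (i : Nat) => if (i : Int) = pvD val then pvCh val else " ") ∘ Nat.succ) (List.range n) := by
        rw [ih 0]
        apply List.map_congr_left
        intro i _
        simp only [Function.comp]
        rw [hd0, hd, if_neg (show ¬(((i.succ : Nat) : Int) = 0) by push_cast; omega)]
        by_cases hi : (i : Int) = 0
        · have hc0 : pvCh 0 = " " := by unfold pvCh; rw [hd0]; norm_num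
          rw [if_pos hi, hc0]
        · rw [if_neg hi]
      have hhead : (if (((0 : Nat) : Int) = pvD val) then pvCh val else " ")
          = if val = 10 then "0" else if val ≠ 0 then PySem.Int.toStr val else " " := by
        rw [if_pos (by rw [hd]; push_cast), hch]
      rw [numConvLoopA, if_neg hv, hhead]
      by_cases h10 : val = 10
      · rw [if_pos h10, if_pos h10, hz]
      · rw [if_neg h10, if_neg h10, hz]

-- ===== VERDICT (by name: the statement is the Claim_ definition above) =====
theorem num_conv_gen_py_spec : Claim_equal_num_conv_gen_py := by
  intro val length _
  unfold Spec_num_conv_gen_py num_conv_gen_py num_conv_gen_py_alt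
  rw [loopA_eq]
  rfl
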